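-- pv_equiv track=rewrite | github.com/rezaie99/lfp_processing | bifengephys/trajectory_process.py | get_nose_dips
-- ===== SOURCE A (Python) =====
-- def get_nose_dips(dists, start_frame, end_frame, fps=50):
--     dip_starttime = []
--     dip_stoptime = []
--
--     begin = 0
--     end = begin
--     dip_count = 0
--
--     in_rad = 144
--     out_rad = 176
--
--     while begin < len(dists) and end < len(dists):
--         while begin < len(dists) and in_rad <= dists[begin] <= out_rad:
--             begin += 1
--         end = begin + 1
--
--         if begin < len(dists) and (not (in_rad <= dists[begin] <= out_rad)):
--             while end < len(dists) and (not (in_rad <= dists[end] <= out_rad)):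
--                 end += 1
--
--             if end < len(dists) and (in_rad <= dists[end] <= out_rad):
--                 if end - begin > fps // 2:
--                     if start_frame <= begin <= end_frame and start_frame <= end <= end_frame:
--                         dip_starttime.append(begin)
--                         dip_stoptime.append(end)
--         begin = end
--
--     return dip_starttime, dip_stoptime
-- ===== SOURCE B (Python) =====
-- def get_nose_dips(dists, start_frame, end_frame, fps=50):
--     # Run-length encode the band-membership predicate, then scan the runs:
--     # an out-of-band run followed by another run (i.e. terminated by an
--     # in-band value) is a candidate dip [begin, end) with end = begin + length.
--     runs = []  # [key, start, length]
--     for i, d in enumerate(dists):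
--         k = 144 <= d <= 176
--         if runs and runs[-1][0] == k:
--             runs[-1][2] += 1
--         else:
--             runs.append([k, i, 1])
--     pairs = [(b, b + n) for k, b, n in runs[:-1]
--              if not k and n > fps // 2
--              and start_frame <= b <= end_frame and start_frame <= b + n <= end_frame]
--     return [b for b, _ in pairs], [e for _, e in pairs]
-- ===== Notes on version B (the rewrite author's own statement) =====
-- stated objective: alternative
-- what changed: Replaces the nested two-pointer while-loop scan with a run-length encoding of the band-membership predicate followed by a single pass over the runs (every out-of-band run that is not the final run yields a candidate interval).
import Mathlib
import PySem

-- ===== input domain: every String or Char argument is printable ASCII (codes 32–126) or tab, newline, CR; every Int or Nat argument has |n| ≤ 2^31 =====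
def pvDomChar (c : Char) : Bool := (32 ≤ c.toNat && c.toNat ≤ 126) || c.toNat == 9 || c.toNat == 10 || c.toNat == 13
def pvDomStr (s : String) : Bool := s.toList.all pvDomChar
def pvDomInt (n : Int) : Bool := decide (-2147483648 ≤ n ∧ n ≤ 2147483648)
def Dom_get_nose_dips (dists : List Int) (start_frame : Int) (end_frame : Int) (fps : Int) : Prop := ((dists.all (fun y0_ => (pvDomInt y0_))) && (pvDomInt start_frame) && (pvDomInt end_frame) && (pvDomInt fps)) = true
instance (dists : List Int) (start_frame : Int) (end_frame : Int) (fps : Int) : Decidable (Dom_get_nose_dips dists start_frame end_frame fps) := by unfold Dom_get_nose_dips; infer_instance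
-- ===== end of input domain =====

-- B replaces A's two-pointer while-loop scan by a run-length encoding of the
-- band-membership predicate followed by one pass over the runs (objective: alternative).

-- ===== PORT A =====
-- in_rad <= d <= out_rad  with in_rad = 144, out_rad = 176
def pvInBand (d : Int) : Bool := decide (144 ≤ d ∧ d ≤ 176)

-- inner `while begin < len(dists) and in_rad <= dists[begin] <= out_rad: begin += 1`
-- (the Nat fuel is only a totality guard; callers pass enough for the scan)
def pvSkipIn (dists : List Int) : Nat → Nat → Nat
  | 0, b => b
  | fuel + 1, b =>
    if b < dists.length ∧ pvInBand (dists.getD b 0) = true then pvSkipIn dists fuel (b + 1)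
    else b

-- inner `while end < len(dists) and not (in_rad <= dists[end] <= out_rad): end += 1`
def pvSkipOut (dists : List Int) : Nat → Nat → Nat
  | 0, e => e
  | fuel + 1, e =>
    if e < dists.length ∧ pvInBand (dists.getD e 0) = false then pvSkipOut dists fuel (e + 1)
    else e

-- outer `while begin < len(dists) and end < len(dists): …` with its body;
-- the three nested ifs guarding the appends are written as one conjunction;
-- the fuel (dists.length + 1 at the call site) is only a totality guard:
-- begin strictly increases every iteration, so it never runs out
def pvLoopA (dists : List Int) (sfr efr fps : Int) :
    Nat → Nat → Nat → List Int → List Int → List Int × List Int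
  | 0, _, _, st, sp => (st, sp)
  | fuel + 1, b, e, st, sp =>
    if b < dists.length ∧ e < dists.length then
      let b' := pvSkipIn dists dists.length b
      if b' < dists.length ∧ pvInBand (dists.getD b' 0) = false then
        let e' := pvSkipOut dists dists.length (b' + 1)
        if e' < dists.length ∧ pvInBand (dists.getD e' 0) = true ∧
            (e' : Int) - (b' : Int) > PySem.Int.floordiv fps 2 ∧
            sfr ≤ (b' : Int) ∧ (b' : Int) ≤ efr ∧ sfr ≤ (e' : Int) ∧ (e' : Int) ≤ efr then
          pvLoopA dists sfr efr fps fuel e' e' (st ++ [(b' : Int)]) (sp ++ [(e' : Int)])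
        else
          pvLoopA dists sfr efr fps fuel e' e' st sp
      else
        pvLoopA dists sfr efr fps fuel (b' + 1) (b' + 1) st sp
    else (st, sp)

def get_nose_dips (dists : List Int) (start_frame : Int) (end_frame : Int) (fps : Int) :
    List Int × List Int :=
  pvLoopA dists start_frame end_frame fps (dists.length + 1) 0 0 [] []

-- ===== PORT B =====
-- run-length encoding of `144 <= d <= 176` over dists, each run as (key, start, length);
-- structural-recursion form of Source B's accumulate-into-last-run loop (same runs list)
def pvRle (l : List Int) (i : Nat) : List (Bool × Nat × Nat) :=
  match l with
  | [] => []
  | d :: t =>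
    let k := pvInBand d
    match pvRle t (i + 1) with
    | [] => [(k, i, 1)]
    | (k', s, n) :: rest =>
      if k' = k then (k, i, n + 1) :: rest else (k, i, 1) :: (k', s, n) :: rest

-- the filter of Source B's comprehension over runs[:-1]
def pvCond (sfr efr fps : Int) (r : Bool × Nat × Nat) : Bool :=
  !r.1 && decide ((r.2.2 : Int) > PySem.Int.floordiv fps 2 ∧
    sfr ≤ (r.2.1 : Int) ∧ (r.2.1 : Int) ≤ efr ∧
    sfr ≤ ((r.2.1 + r.2.2 : Nat) : Int) ∧ ((r.2.1 + r.2.2 : Nat) : Int) ≤ efr)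

def get_nose_dips_alt (dists : List Int) (start_frame : Int) (end_frame : Int) (fps : Int) :
    List Int × List Int :=
  let runs := pvRle dists 0
  let pairs := runs.dropLast.filterMap (fun r =>
    if pvCond start_frame end_frame fps r then
      some (((r.2.1 : Nat) : Int), ((r.2.1 + r.2.2 : Nat) : Int))
    else none)
  (pairs.map Prod.fst, pairs.map Prod.snd)

-- ===== PRECONDITION & SPEC =====
def Spec_get_nose_dips (dists : List Int) (start_frame : Int) (end_frame : Int) (fps : Int) (out : List Int × List Int) : Prop := out = get_nose_dips_alt dists start_frame end_frame fps
instance (dists : List Int) (start_frame : Int) (end_frame : Int) (fps : Int) (out : List Int × List Int) : Decidable (Spec_get_nose_dips dists start_frame end_frame fps out) := by unfold Spec_get_nose_dips; infer_instance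

-- ===== CLAIM (what is proved, stated in full; the proofs are below) =====
def Claim_equal_get_nose_dips : Prop := ∀ (dists : List Int) (start_frame : Int) (end_frame : Int) (fps : Int), Dom_get_nose_dips dists start_frame end_frame fps → Spec_get_nose_dips dists start_frame end_frame fps (get_nose_dips dists start_frame end_frame fps)

-- ===== LEMMAS AND PROOFS =====

-- proof-side abbreviation for B's run pass
def pvProc (sfr efr fps : Int) (runs : List (Bool × Nat × Nat)) : List (Int × Int) :=
  runs.dropLast.filterMap (fun r =>
    if pvCond sfr efr fps r then
      some (((r.2.1 : Nat) : Int), ((r.2.1 + r.2.2 : Nat) : Int))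
    else none)

theorem pvProc_cons (sfr efr fps : Int) (r : Bool × Nat × Nat) (rs : List (Bool × Nat × Nat)) :
    pvProc sfr efr fps (r :: rs) =
      (if rs = [] then [] else if pvCond sfr efr fps r then
        [(((r.2.1 : Nat) : Int), ((r.2.1 + r.2.2 : Nat) : Int))] else []) ++ pvProc sfr efr fps rs := by
  cases rs with
  | nil => simp [pvProc]
  | cons x xs =>
    by_cases hc : pvCond sfr efr fps r = true
    · simp [pvProc, List.dropLast_cons₂, hc]
    · simp [pvProc, List.dropLast_cons₂, hc]

-- proof-side abbreviation: band membership at index j (default 0 out of range)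
def pvG (l : List Int) (j : Nat) : Bool := pvInBand (l.getD j 0)

theorem pvG_cons_zero (d : Int) (t : List Int) : pvG (d :: t) 0 = pvInBand d := rfl

theorem pvG_cons_succ (d : Int) (t : List Int) (j : Nat) : pvG (d :: t) (j + 1) = pvG t j := by
  simp [pvG]

-- the shape of a nonempty run-length encoding
theorem pvRle_shape : ∀ (l : List Int) (i : Nat), l ≠ [] →
    ∃ n, 1 ≤ n ∧ n ≤ l.length ∧
      pvRle l i = (pvG l 0, i, n) :: pvRle (l.drop n) (i + n) ∧
      (∀ j, j < n → pvG l j = pvG l 0) ∧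
      (n < l.length → pvG l n ≠ pvG l 0) := by
  intro l
  induction l with
  | nil => intro i h; exact absurd rfl h
  | cons d t ih =>
    intro i _
    by_cases ht : t = []
    · subst ht
      refine ⟨1, le_refl 1, by simp, by simp [pvRle, pvG_cons_zero], ?_, by simp⟩
      intro j hj
      interval_cases j
      rfl
    · obtain ⟨n, hn1, hnl, hshape, hconst, hbound⟩ := ih (i + 1) ht
      by_cases hk : pvG t 0 = pvInBand d
      · refine ⟨n + 1, by omega, by simp; omega, ?_, ?_, ?_⟩
        · rw [pvG_cons_zero, List.drop_succ_cons,
            show i + (n + 1) = i + 1 + n from by omega]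
          simp only [pvRle, hshape]
          rw [if_pos hk]
        · intro j hj
          cases j with
          | zero => rfl
          | succ j' =>
            rw [pvG_cons_succ, pvG_cons_zero, hconst j' (by omega), hk]
        · intro hlt
          rw [pvG_cons_succ, pvG_cons_zero, ← hk]
          exact hbound (by simpa using hlt)
      · refine ⟨1, le_refl 1, by simp, ?_, ?_, ?_⟩
        · rw [pvG_cons_zero, List.drop_succ_cons, List.drop_zero]
          simp only [pvRle, hshape]
          rw [if_neg hk]
        · intro j hj
          interval_cases j
          rfl
        · intro _
          rw [pvG_cons_succ, pvG_cons_zero]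
          exact hk

-- pvSkipIn reaches the end of a constant in-band block (given enough fuel)
theorem pvSkipIn_eq (dists : List Int) (c : Nat) (hcl : c ≤ dists.length)
    (hend : c < dists.length → pvG dists c = false) :
    ∀ (fuel : Nat) (b : Nat), c - b ≤ fuel → b ≤ c →
      (∀ i, b ≤ i → i < c → pvG dists i = true) →
      pvSkipIn dists fuel b = c := by
  intro fuel
  induction fuel with
  | zero =>
    intro b hf hbc _
    have hbceq : b = c := by omega
    subst hbceq
    rfl
  | succ f ihf =>
    intro b hf hbc hin
    by_cases hb : b < c
    · simp only [pvSkipIn]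
      rw [if_pos ⟨by omega, hin b (le_refl b) hb⟩]
      exact ihf (b + 1) (by omega) (by omega) (fun i h1 h2 => hin i (by omega) h2)
    · have hbceq : b = c := by omega
      subst hbceq
      simp only [pvSkipIn]
      rw [if_neg]
      rintro ⟨h1, h2⟩
      have h2' : pvG dists b = true := h2
      rw [hend h1] at h2'
      exact Bool.false_ne_true h2'

-- pvSkipOut reaches the end of a constant out-of-band block (given enough fuel)
theorem pvSkipOut_eq (dists : List Int) (c : Nat) (hcl : c ≤ dists.length)
    (hend : c < dists.length → pvG dists c = true) :
    ∀ (fuel : Nat) (b : Nat), c - b ≤ fuel → b ≤ c →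
      (∀ i, b ≤ i → i < c → pvG dists i = false) →
      pvSkipOut dists fuel b = c := by
  intro fuel
  induction fuel with
  | zero =>
    intro b hf hbc _
    have hbceq : b = c := by omega
    subst hbceq
    rfl
  | succ f ihf =>
    intro b hf hbc hout
    by_cases hb : b < c
    · simp only [pvSkipOut]
      rw [if_pos ⟨by omega, hout b (le_refl b) hb⟩]
      exact ihf (b + 1) (by omega) (by omega) (fun i h1 h2 => hout i (by omega) h2)
    · have hbceq : b = c := by omega
      subst hbceq
      simp only [pvSkipOut]
      rw [if_neg]
      rintro ⟨h1, h2⟩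
      have h2' : pvG dists b = false := h2
      rw [hend h1] at h2'
      exact Bool.false_ne_true h2'.symm

theorem pvLoopA_stop (dists : List Int) (sfr efr fps : Int) (fuel b e : Nat)
    (st sp : List Int) (h : ¬(b < dists.length ∧ e < dists.length)) :
    pvLoopA dists sfr efr fps fuel b e st sp = (st, sp) := by
  cases fuel with
  | zero => rfl
  | succ f =>
    simp only [pvLoopA]
    rw [if_neg h]

theorem pvRle_ne_nil (l : List Int) (i : Nat) (h : l ≠ []) : pvRle l i ≠ [] := by
  cases l with
  | nil => exact absurd rfl h
  | cons d t =>
    simp only [pvRle]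
    cases pvRle t (i + 1) with
    | nil => simp
    | cons r rs =>
      obtain ⟨k', s', n'⟩ := r
      dsimp only
      split <;> simp

-- main invariant: from any position b (with begin = end = b), A's loop appends
-- exactly the filtered pairs B computes from the runs of the suffix dists[b:]
theorem pvLoopA_eq_proc (dists : List Int) (sfr efr fps : Int) :
    ∀ (m fuel b : Nat), dists.length + 1 - b ≤ fuel → dists.length - b ≤ m →
      ∀ (st sp : List Int),
      pvLoopA dists sfr efr fps fuel b b st sp =
        (st ++ (pvProc sfr efr fps (pvRle (dists.drop b) b)).map Prod.fst,
         sp ++ (pvProc sfr efr fps (pvRle (dists.drop b) b)).map Prod.snd) := by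
  intro m
  induction m with
  | zero =>
    intro fuel b hf hb st sp
    rw [pvLoopA_stop dists sfr efr fps fuel b b st sp (by omega)]
    rw [List.drop_eq_nil_of_le (by omega)]
    simp [pvRle, pvProc]
  | succ m ihm =>
    intro fuel b hf hb st sp
    by_cases hbl : b < dists.length
    · -- suffix nonempty: look at its first run
      obtain ⟨f, rfl⟩ : ∃ f, fuel = f + 1 := ⟨fuel - 1, by omega⟩
      have hne : dists.drop b ≠ [] := by
        intro h
        rw [List.drop_eq_nil_iff] at h
        omega
      obtain ⟨n, hn1, hnl, hshape, hconst, hbound⟩ := pvRle_shape (dists.drop b) b hne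
      have hlen : (dists.drop b).length = dists.length - b := List.length_drop ..
      have hGd : ∀ j, pvG (dists.drop b) j = pvG dists (b + j) := by
        intro j
        simp [pvG, List.getD, List.getElem?_drop]
      have hdd : (dists.drop b).drop n = dists.drop (b + n) := by
        rw [List.drop_drop]
      rw [hdd] at hshape
      have hbn : b + n ≤ dists.length := by omega
      have hG0 : pvG (dists.drop b) 0 = pvG dists b := by simpa using hGd 0
      rw [hG0] at hshape
      have hconst' : ∀ i, b ≤ i → i < b + n → pvG dists i = pvG dists b := by
        intro i h1 h2
        have h := hconst (i - b) (by omega)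
        rw [hGd, hG0, show b + (i - b) = i from by omega] at h
        exact h
      have hbound' : b + n < dists.length → pvG dists (b + n) ≠ pvG dists b := by
        intro h
        have h' := hbound (by omega)
        rwa [hGd, hG0] at h'
      by_cases hk : pvG dists b = true
      · -- in-band run [b, b+n): A skips it, B's pass never selects it
        rw [hk] at hshape
        have hskip : pvSkipIn dists dists.length b = b + n :=
          pvSkipIn_eq dists (b + n) hbn
            (fun h => by
              have h' := hbound' h
              rw [hk] at h'
              exact Bool.eq_false_iff.mpr h')
            dists.length b (by omega) (by omega)
            (fun i h1 h2 => by rw [hconst' i h1 h2, hk])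
        have hstep : pvLoopA dists sfr efr fps (f + 1) b b st sp =
            pvLoopA dists sfr efr fps (f + 1) (b + n) (b + n) st sp := by
          by_cases hbn2 : b + n < dists.length
          · have hskip2 : pvSkipIn dists dists.length (b + n) = b + n :=
              pvSkipIn_eq dists (b + n) hbn
                (fun h => by
                  have h' := hbound' hbn2
                  rw [hk] at h'
                  exact Bool.eq_false_iff.mpr h')
                dists.length (b + n) (by omega) (le_refl _)
                (fun i h1 h2 => absurd h2 (by omega))
            have hGf : pvInBand (dists.getD (b + n) 0) = false :=
              Bool.eq_false_iff.mpr (by rw [hk] at hbound'; exact hbound' hbn2)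
            simp only [pvLoopA]
            rw [hskip, hskip2,
              if_pos (⟨hbl, hbl⟩ : b < dists.length ∧ b < dists.length),
              if_pos (⟨hbn2, hGf⟩ :
                b + n < dists.length ∧ pvInBand (dists.getD (b + n) 0) = false),
              if_pos (⟨hbn2, hbn2⟩ : b + n < dists.length ∧ b + n < dists.length)]
          · simp only [pvLoopA]
            rw [if_pos ⟨hbl, hbl⟩, hskip]
            rw [if_neg (by rintro ⟨h1, -⟩; omega)]
            rw [pvLoopA_stop dists sfr efr fps f (b + n + 1) (b + n + 1) st sp (by omega)]
            rw [if_neg (by rintro ⟨h1, -⟩; omega)]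
        rw [hstep, ihm (f + 1) (b + n) (by omega) (by omega) st sp, hshape, pvProc_cons]
        simp [pvCond]
      · -- out-of-band run [b, b+n): candidate dip interval
        have hkf : pvG dists b = false := by
          revert hk
          cases pvG dists b <;> simp
        rw [hkf] at hshape
        have hskip : pvSkipIn dists dists.length b = b :=
          pvSkipIn_eq dists b (by omega) (fun _ => hkf) dists.length b (by omega)
            (le_refl _) (fun i h1 h2 => absurd h2 (by omega))
        have hskip2 : pvSkipOut dists dists.length (b + 1) = b + n :=
          pvSkipOut_eq dists (b + n) hbn
            (fun h => by
              have h' := hbound' h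
              rw [hkf] at h'
              revert h'
              cases pvG dists (b + n) <;> simp)
            dists.length (b + 1) (by omega) (by omega)
            (fun i h1 h2 => by rw [hconst' i (by omega) h2, hkf])
        have hcast : ((b + n : Nat) : Int) = (b : Int) + (n : Int) := by push_cast; ring
        simp only [pvLoopA]
        rw [hskip, hskip2, if_pos (⟨hbl, hbl⟩ : b < dists.length ∧ b < dists.length),
          if_pos (⟨hbl, hkf⟩ : b < dists.length ∧ pvInBand (dists.getD b 0) = false)]
        by_cases hbn2 : b + n < dists.length
        · have hGbn : pvG dists (b + n) = true := by
            have h' := hbound' hbn2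
            rw [hkf] at h'
            revert h'
            cases pvG dists (b + n) <;> simp
          have hrestne : pvRle (dists.drop (b + n)) (b + n) ≠ [] :=
            pvRle_ne_nil _ _ (by
              intro h
              rw [List.drop_eq_nil_iff] at h
              omega)
          by_cases hC : (n : Int) > PySem.Int.floordiv fps 2 ∧ sfr ≤ (b : Int) ∧
              (b : Int) ≤ efr ∧ sfr ≤ (b : Int) + (n : Int) ∧ (b : Int) + (n : Int) ≤ efr
          · have hcond : pvCond sfr efr fps (false, b, n) = true := by
              simp only [pvCond, Bool.not_false, Bool.true_and, decide_eq_true_eq]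
              exact ⟨hC.1, hC.2.1, hC.2.2.1, by rw [hcast]; exact hC.2.2.2.1,
                by rw [hcast]; exact hC.2.2.2.2⟩
            rw [if_pos ⟨hbn2, show pvInBand (dists.getD (b + n) 0) = true from hGbn,
              by rw [hcast]; linarith [hC.1], hC.2.1, hC.2.2.1,
              by rw [hcast]; exact hC.2.2.2.1, by rw [hcast]; exact hC.2.2.2.2⟩]
            rw [ihm f (b + n) (by omega) (by omega), hshape, pvProc_cons,
              if_neg hrestne, if_pos hcond]
            simp
          · have hcond : pvCond sfr efr fps (false, b, n) = false := by
              simp only [pvCond, Bool.not_false, Bool.true_and, decide_eq_false_iff_not]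
              intro h'
              exact hC ⟨h'.1, h'.2.1, h'.2.2.1, by rw [← hcast]; exact h'.2.2.2.1,
                by rw [← hcast]; exact h'.2.2.2.2⟩
            rw [if_neg (by
              rintro ⟨-, -, h3, h4, h5, h6, h7⟩
              rw [hcast] at h3 h6 h7
              exact hC ⟨by linarith, h4, h5, h6, h7⟩)]
            rw [ihm f (b + n) (by omega) (by omega), hshape, pvProc_cons,
              if_neg hrestne, hcond]
            simp
        · -- the final run is out-of-band: no in-band terminator, nothing appended
          have hrest : dists.drop (b + n) = [] := List.drop_eq_nil_of_le (by omega)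
          rw [hrest] at hshape
          rw [if_neg (by rintro ⟨h1, -⟩; omega)]
          rw [pvLoopA_stop dists sfr efr fps f (b + n) (b + n) st sp (by omega)]
          rw [hshape, pvProc_cons]
          simp [pvRle, pvProc]
    · rw [pvLoopA_stop dists sfr efr fps fuel b b st sp (by omega)]
      rw [List.drop_eq_nil_of_le (by omega)]
      simp [pvRle, pvProc]

-- ===== VERDICT (by name: the statement is the Claim_ definition above) =====
theorem get_nose_dips_spec : Claim_equal_get_nose_dips := by
  intro dists sfr efr fps _
  unfold Spec_get_nose_dips get_nose_dips get_nose_dips_alt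
  have h := pvLoopA_eq_proc dists sfr efr fps dists.length (dists.length + 1) 0
    (by omega) (by omega) [] []
  simpa [pvProc] using h
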